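-- pv_equiv track=rewrite | github.com/mellery/project_euler | problem61.py | get_oct
-- ===== SOURCE A (Python) =====
-- def get_oct(limit):
--     results = []
--     i = 1
--     while(1):
--         n = i*(3*i-2)
--         i = i + 1
--         if n < limit:
--             if n >= 1000:
--                 results.append(n)
--         else:
--             return results
-- ===== SOURCE B (Python) =====
-- def _isqrt(n):
--     # Newton's method floor square root (n >= 0)
--     x = n
--     y = (x + 1) // 2
--     while y < x:
--         x = y
--         y = (x + n // x) // 2
--     return x
--
-- def get_oct(limit):
--     if limit <= 1045:
--         return []
--     end = (_isqrt(3 * limit) + 4) // 3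
--     return [i * (3 * i - 2) for i in range(19, end)]
-- ===== Notes on version B (the rewrite author's own statement) =====
-- stated objective: alternative
-- what changed: B derives the producing index window arithmetically - the first four-digit octagonal index is a fixed constant and the first index reaching the limit comes from the closed-form quadratic solution via an integer Newton square root - then maps indices to values in one straight pass, instead of A's scan-and-test loop from the first index with per-item lower/upper-bound comparisons.
import Mathlib
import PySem

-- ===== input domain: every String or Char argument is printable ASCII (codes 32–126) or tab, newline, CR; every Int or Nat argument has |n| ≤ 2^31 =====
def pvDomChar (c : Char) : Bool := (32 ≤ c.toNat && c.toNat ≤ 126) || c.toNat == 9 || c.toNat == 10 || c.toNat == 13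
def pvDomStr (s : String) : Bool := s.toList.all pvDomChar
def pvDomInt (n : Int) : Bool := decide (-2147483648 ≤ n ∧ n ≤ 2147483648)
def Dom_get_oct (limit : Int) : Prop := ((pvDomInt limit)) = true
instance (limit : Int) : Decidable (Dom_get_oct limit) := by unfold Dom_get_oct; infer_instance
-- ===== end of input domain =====

-- B replaces A's scan-and-test loop by a closed-form index window (derived with an integer
-- Newton square root) followed by one map over exactly the producing indices; same values.

-- ===== PORT A =====
-- A's while(1) loop: i starts at 1 and only increases, so it is carried as a Nat counter;
-- n, limit and the results stay Int exactly as in Python.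
def get_oct.loop (limit : Int) (i : Nat) (results : List Int) : List Int :=
  let n : Int := (i : Int) * (3 * (i : Int) - 2)
  if h : n < limit then
    get_oct.loop limit (i + 1) (if 1000 ≤ n then results ++ [n] else results)
  else
    results
  termination_by limit.toNat + 1 - i
  decreasing_by
    have hi : (i : Int) ≤ (i : Int) * (3 * (i : Int) - 2) ∨ i = 0 := by
      rcases Nat.eq_zero_or_pos i with h0 | h0
      · exact Or.inr h0
      · left
        have : (1 : Int) ≤ (i : Int) := by exact_mod_cast h0
        nlinarith
    rcases hi with hi | hi
    · have : (i : Int) < limit := lt_of_le_of_lt hi h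
      omega
    · subst hi; omega

def get_oct (limit : Int) : List Int := get_oct.loop limit 1 []

-- ===== PORT B =====
-- Source B's _isqrt, Newton's method; the while loop becomes recursion on the decreasing x.
def newtonStep (n x y : Nat) : Nat :=
  if y < x then newtonStep n y ((y + n / y) / 2) else x
  termination_by x

def isqrtB (n : Nat) : Nat := newtonStep n n ((n + 1) / 2)

-- Source B calls _isqrt(3*limit) only when limit > 1045, so the argument is a positive int:
-- it is carried as the Nat (3*limit).toNat (exact there).
def get_oct_alt (limit : Int) : List Int :=
  if limit ≤ 1045 then []
  else
    let e : Int := ((isqrtB (3 * limit).toNat + 4) / 3 : Nat)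
    (PySem.List.pyRange 19 e 1).map (fun i => i * (3 * i - 2))

-- ===== PRECONDITION & SPEC =====
def Spec_get_oct (limit : Int) (out : List Int) : Prop := out = get_oct_alt limit
instance (limit : Int) (out : List Int) : Decidable (Spec_get_oct limit out) := by unfold Spec_get_oct; infer_instance

-- ===== CLAIM (what is proved, stated in full; the proofs are below) =====
def Claim_equal_get_oct : Prop := ∀ (limit : Int), Dom_get_oct limit → Spec_get_oct limit (get_oct limit)

-- ===== LEMMAS AND PROOFS =====

-- the stopping index of A's loop / B's window end
def eIdx (limit : Int) : Nat := (Nat.sqrt (3 * limit).toNat + 4) / 3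

lemma newton_step_ge (n x : Nat) (hx : 1 ≤ x) : Nat.sqrt n ≤ (x + n / x) / 2 := by
  by_contra hc
  rw [Nat.not_le] at hc
  set s := Nat.sqrt n with hs
  set q := n / x with hq
  have h1 : x + q + 1 ≤ 2 * s := by omega
  have h2 : x * q ≤ n := by
    rw [hq, Nat.mul_comm]
    exact Nat.div_mul_le_self n x
  have h3 : n < x * q + x := by
    have hdm := Nat.div_add_mod n x
    have hm : n % x < x := Nat.mod_lt n (by omega)
    rw [hq]
    omega
  have h4 : s * s ≤ n := by
    have h4' := Nat.sqrt_le' n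
    rw [pow_two] at h4'
    exact h4'
  have hxI : (1 : Int) ≤ (x : Int) := by exact_mod_cast hx
  have h1I : (x : Int) + q + 1 ≤ 2 * s := by exact_mod_cast h1
  have h2I : (x : Int) * q ≤ n := by exact_mod_cast h2
  have h3I : (n : Int) < x * q + x := by exact_mod_cast h3
  have h4I : (s : Int) * s ≤ n := by exact_mod_cast h4
  nlinarith [sq_nonneg ((x : Int) - (s : Int))]

lemma newton_exit (n x y : Nat) (hx : 1 ≤ x) (hy : y = (x + n / x) / 2) (hxy : x ≤ y) :
    x * x ≤ n := by
  subst hy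
  have h1 : x ≤ n / x := by omega
  have := Nat.mul_le_of_le_div x x n h1
  · omega

lemma newtonStep_eq (n : Nat) (hn : 1 ≤ n) :
    ∀ x y, 1 ≤ x → Nat.sqrt n ≤ x → y = (x + n / x) / 2 → newtonStep n x y = Nat.sqrt n := by
  intro x
  induction x using Nat.strong_induction_on with
  | _ x ih =>
    intro y hx hs hy
    rw [newtonStep]
    split
    · -- y < x : recurse
      rename_i hlt
      have hys : Nat.sqrt n ≤ y := hy ▸ newton_step_ge n x hx
      have hsn : 1 ≤ Nat.sqrt n := Nat.le_sqrt'.mpr (by simpa using hn)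
      exact ih y hlt ((y + n / y) / 2) (by omega) hys rfl
    · -- x ≤ y : exit
      rename_i hge
      have hxx : x * x ≤ n := newton_exit n x y hx hy (by omega)
      have : x ≤ Nat.sqrt n := Nat.le_sqrt'.mpr (by rw [pow_two]; exact hxx)
      omega

lemma isqrtB_eq (n : Nat) (hn : 1 ≤ n) : isqrtB n = Nat.sqrt n := by
  unfold isqrtB
  have hd : n / n = 1 := Nat.div_self (by omega)
  exact newtonStep_eq n hn n ((n + 1) / 2) hn (Nat.sqrt_le_self n) (by rw [hd])

-- K: the loop-continue condition is exactly i < eIdx limit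
lemma continue_iff (limit : Int) (i : Nat) (hi : 1 ≤ i) :
    (i : Int) * (3 * (i : Int) - 2) < limit ↔ i < eIdx limit := by
  unfold eIdx
  rcases le_or_gt limit 0 with hl | hl
  · have h1 : (1 : Int) ≤ (i : Int) := by exact_mod_cast hi
    have hpos : (1 : Int) ≤ (i : Int) * (3 * (i : Int) - 2) := by nlinarith
    have : (3 * limit).toNat = 0 := by omega
    rw [this]
    simp only [Nat.sqrt_zero]
    constructor
    · intro h; omega
    · intro h; omega
  · obtain ⟨j, rfl⟩ : ∃ j, i = j + 1 := ⟨i - 1, by omega⟩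
    set k := limit.toNat with hk
    have hkl : limit = (k : Int) := by omega
    have h3 : (3 * limit).toNat = 3 * k := by omega
    rw [h3]
    set s := Nat.sqrt (3 * k) with hs
    have e1 : 3 * (j + 1) - 1 = 3 * j + 2 := by omega
    have hm : (3 * j + 2) * (3 * j + 2) = 3 * ((j + 1) * (3 * j + 1)) + 1 := by ring
    have hsq : 3 * (j + 1) - 1 ≤ s ↔ (3 * (j + 1) - 1) ^ 2 ≤ 3 * k := Nat.le_sqrt'
    rw [pow_two, e1] at hsq
    have hcast : (↑(j+1) : Int) * (3 * (↑(j+1) : Int) - 2) = (((j + 1) * (3 * j + 1) : Nat) : Int) := by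
      push_cast; ring
    rw [hcast, hkl, Nat.cast_lt]
    omega

-- M: the 1000-filter is exactly 19 ≤ i
lemma thousand_iff (i : Nat) (hi : 1 ≤ i) :
    (1000 : Int) ≤ (i : Int) * (3 * (i : Int) - 2) ↔ 19 ≤ i := by
  obtain ⟨j, rfl⟩ : ∃ j, i = j + 1 := ⟨i - 1, by omega⟩
  constructor
  · intro h
    by_contra hc
    push_cast at h
    have hj : (j : Int) ≤ 17 := by exact_mod_cast (by omega : j ≤ 17)
    have : (0:Int) ≤ (j:Int) := by positivity
    nlinarith
  · intro h
    have hj : (18 : Int) ≤ (j : Int) := by exact_mod_cast (by omega : 18 ≤ j)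
    push_cast
    nlinarith

def fOct (i : Nat) : Int := (i : Int) * (3 * (i : Int) - 2)

lemma loop_eq (limit : Int) :
    ∀ d i acc, 1 ≤ i → eIdx limit - i = d → get_oct.loop limit i acc =
      acc ++ ((((List.range (eIdx limit - i)).map (fun k => i + k)).filter
        (fun j => 19 ≤ j)).map fOct) := by
  intro d
  induction d with
  | zero =>
    intro i acc hi hd
    rw [get_oct.loop]
    have hnc : ¬ ((i : Int) * (3 * (i : Int) - 2) < limit) := by
      rw [continue_iff _ _ hi]
      omega
    rw [dif_neg hnc, hd]
    simp
  | succ d ih =>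
    intro i acc hi hd
    rw [get_oct.loop]
    have hc : (i : Int) * (3 * (i : Int) - 2) < limit := by
      rw [continue_iff _ _ hi]
      omega
    rw [dif_pos hc]
    rw [ih (i + 1) _ (by omega) (by omega)]
    rw [hd, List.range_succ_eq_map, List.map_cons, List.map_map]
    have hmap : ((fun k => i + k) ∘ Nat.succ) = (fun k => (i + 1) + k) := by
      funext k
      simp [Function.comp]
      omega
    rw [hmap]
    have hd' : eIdx limit - (i + 1) = d := by omega
    rw [hd']
    by_cases h19 : 19 ≤ i
    · have hb : (1000 : Int) ≤ (i : Int) * (3 * (i : Int) - 2) := (thousand_iff i hi).mpr h19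
      rw [if_pos hb, List.filter_cons_of_pos (by simpa using h19)]
      simp [fOct]
    · have hb : ¬ ((1000 : Int) ≤ (i : Int) * (3 * (i : Int) - 2)) := by
        rw [thousand_iff i hi]
        exact h19
      rw [if_neg hb, List.filter_cons_of_neg (by simpa using h19)]

lemma filter_range_shift (n : Nat) :
    ((List.range n).map (fun k => 1 + k)).filter (fun j => 19 ≤ j) =
      (List.range (n - 18)).map (fun k => 19 + k) := by
  induction n with
  | zero => simp
  | succ n ih =>
    rw [List.range_succ, List.map_append, List.filter_append, ih]
    by_cases h : 18 ≤ n
    · have h1 : n + 1 - 18 = (n - 18) + 1 := by omega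
      rw [h1, List.range_succ, List.map_append]
      simp only [List.map_cons, List.map_nil, List.filter_cons, List.filter_nil]
      have : (19 ≤ 1 + n) = True := by simp; omega
      simp only [decide_eq_true_eq]
      rw [if_pos (by omega : 19 ≤ 1 + n)]
      have : 19 + (n - 18) = 1 + n := by omega
      rw [this]
    · have h1 : n + 1 - 18 = n - 18 := by omega
      rw [h1]
      simp only [List.map_cons, List.map_nil, List.filter_cons, List.filter_nil]
      simp only [decide_eq_true_eq]
      rw [if_neg (by omega : ¬ 19 ≤ 1 + n)]
      simp

-- ===== VERDICT (by name: the statement is the Claim_ definition above) =====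
theorem get_oct_spec : Claim_equal_get_oct := by
  intro limit _
  show get_oct limit = get_oct_alt limit
  set E := eIdx limit with hE
  have hA : get_oct limit = ((List.range (E - 1 - 18)).map (fun k => 19 + k)).map fOct := by
    unfold get_oct
    rw [loop_eq limit (E - 1) 1 [] (by omega) rfl]
    rw [List.nil_append, filter_range_shift]
  have h19iff : ((19 : Int) * (3 * (19 : Int) - 2) < limit) ↔ 19 < E := by
    have := continue_iff limit 19 (by omega)
    simpa using this
  by_cases hl : limit ≤ 1045
  · have hE19 : E ≤ 19 := by
      have : ¬ ((19 : Int) * (3 * (19 : Int) - 2) < limit) := by norm_num; omega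
      rw [h19iff] at this
      omega
    rw [hA]
    unfold get_oct_alt
    rw [if_pos hl]
    have : E - 1 - 18 = 0 := by omega
    rw [this]
    simp
  · have hE20 : 19 < E := by
      rw [← h19iff]
      norm_num
      omega
    rw [hA]
    unfold get_oct_alt
    rw [if_neg hl]
    have hsq : isqrtB (3 * limit).toNat = Nat.sqrt (3 * limit).toNat :=
      isqrtB_eq _ (by omega)
    have heq : ((isqrtB (3 * limit).toNat + 4) / 3 : Nat) = E := by
      rw [hsq, hE]
      rfl
    rw [heq]
    show List.map fOct (List.map (fun k => 19 + k) (List.range (E - 1 - 18))) =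
      List.map (fun i => i * (3 * i - 2)) (PySem.List.pyRange 19 (E : Int) 1)
    rw [PySem.List.pyRange_one]
    have htn : ((E : Int) - 19).toNat = E - 19 := by omega
    rw [htn, List.map_map, List.map_map]
    have hE' : E - 1 - 18 = E - 19 := by omega
    rw [hE']
    apply List.map_congr_left
    intro k _
    simp only [Function.comp, fOct]
    push_cast
    ring
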